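-- pv_equiv track=rewrite | github.com/kulidje/x8313-etl | wrap/amtotetemp.py | _line_to_list
-- ===== SOURCE A (Python) =====
-- def _line_to_list(line):
--     """ internal f() to convert a line of the response to GetPrograms() to a list"""
--     df_line = [x for x in line.split(' ') if len(x)]
--     # if there are 5 elements, assume the "Long Name" should be combined
--     if len(df_line) == 5:
--         df_line = [df_line[0], df_line[1] + df_line[2], df_line[3], df_line[4]]
--     elif len(df_line) == 6:
--         df_line = [df_line[0], df_line[1] + df_line[2] + df_line[3], df_line[4], df_line[5]]
--     elif len(df_line) == 7:
--         df_line = [df_line[0], df_line[1] + df_line[2] + df_line[3] + df_line[4], df_line[5], df_line[6]]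
--     elif len(df_line) == 8:
--         df_line = [df_line[0], df_line[1] + df_line[2] + df_line[3] + df_line[4] + df_line[5], df_line[6], df_line[7]]
--     return df_line
-- ===== SOURCE B (Python) =====
-- def _line_to_list(line):
--     """ internal f() to convert a line of the response to GetPrograms() to a list"""
--     df_line = [x for x in line.split(' ') if x]
--     # iteratively fold the "Long Name" pieces: merge fields 1 and 2 until 4 fields remain
--     while 4 < len(df_line) <= 8:
--         df_line = [df_line[0], df_line[1] + df_line[2]] + df_line[3:]
--     return df_line
-- ===== Notes on version B (the rewrite author's own statement) =====
-- stated objective: simpler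
-- what changed: B replaces A's four hard-coded per-length elif branches (each building the merged middle field by an explicit run of concatenations) with a single while loop that repeatedly folds field 2 into field 1 while 4 < len <= 8, an iterative fixpoint reduction to four fields.
import Mathlib
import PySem

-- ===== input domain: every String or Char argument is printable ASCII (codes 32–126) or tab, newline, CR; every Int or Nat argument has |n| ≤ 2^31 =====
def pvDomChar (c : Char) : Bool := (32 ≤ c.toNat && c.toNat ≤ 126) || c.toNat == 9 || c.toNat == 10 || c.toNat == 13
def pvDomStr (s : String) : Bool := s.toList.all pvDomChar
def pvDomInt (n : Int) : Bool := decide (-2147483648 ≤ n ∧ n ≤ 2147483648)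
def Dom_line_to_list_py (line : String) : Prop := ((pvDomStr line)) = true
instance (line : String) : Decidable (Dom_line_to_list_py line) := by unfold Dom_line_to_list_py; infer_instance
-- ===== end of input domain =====

-- B replaces A's four per-length elif branches by a while loop that repeatedly merges fields 1 and 2 while 4 < len ≤ 8; objective: simpler.

-- ===== PORT A =====
-- A's branch cascade on len(df_line), each branch hard-coding its concatenations
def pvBranchesA (df : List String) : List String :=
  if df.length = 5 then
    [PySem.List.pyGetD df 0 "", PySem.List.pyGetD df 1 "" ++ PySem.List.pyGetD df 2 "",
     PySem.List.pyGetD df 3 "", PySem.List.pyGetD df 4 ""]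
  else if df.length = 6 then
    [PySem.List.pyGetD df 0 "", PySem.List.pyGetD df 1 "" ++ PySem.List.pyGetD df 2 "" ++ PySem.List.pyGetD df 3 "",
     PySem.List.pyGetD df 4 "", PySem.List.pyGetD df 5 ""]
  else if df.length = 7 then
    [PySem.List.pyGetD df 0 "", PySem.List.pyGetD df 1 "" ++ PySem.List.pyGetD df 2 "" ++ PySem.List.pyGetD df 3 "" ++ PySem.List.pyGetD df 4 "",
     PySem.List.pyGetD df 5 "", PySem.List.pyGetD df 6 ""]
  else if df.length = 8 then
    [PySem.List.pyGetD df 0 "", PySem.List.pyGetD df 1 "" ++ PySem.List.pyGetD df 2 "" ++ PySem.List.pyGetD df 3 "" ++ PySem.List.pyGetD df 4 "" ++ PySem.List.pyGetD df 5 "",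
     PySem.List.pyGetD df 6 "", PySem.List.pyGetD df 7 ""]
  else df

def line_to_list_py (line : String) : List String :=
  pvBranchesA (((PySem.Str.split? line " ").getD []).filter (fun x => PySem.Str.len x != 0))

-- ===== PORT B =====
-- one iteration of B's while body: [df[0], df[1] + df[2]] + df[3:]
def pvMergeStep (df : List String) : List String :=
  [PySem.List.pyGetD df 0 "", PySem.List.pyGetD df 1 "" ++ PySem.List.pyGetD df 2 ""]
    ++ PySem.List.slice df (some 3) none

-- termination helper cited by pvMergeLoop's decreasing_by
lemma pvMergeStep_len_lt (df : List String) (h : 4 < df.length) :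
    (pvMergeStep df).length < df.length := by
  match df with
  | [] | [_] | [_, _] => simp at h
  | a :: b :: c :: rest =>
      simp [pvMergeStep, PySem.List.slice, PySem.List.pyGetD, PySem.List.pyGet?, PySem.List.pyIdx?]

-- B's while loop: merge until at most 4 fields remain (skipped entirely when len > 8 or len ≤ 4)
def pvMergeLoop (df : List String) : List String :=
  if h : 4 < df.length ∧ df.length ≤ 8 then pvMergeLoop (pvMergeStep df) else df
termination_by df.length
decreasing_by exact pvMergeStep_len_lt df h.1

def line_to_list_py_alt (line : String) : List String :=
  pvMergeLoop (((PySem.Str.split? line " ").getD []).filter (fun x => x != ""))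

-- ===== PRECONDITION & SPEC =====
def Spec_line_to_list_py (line : String) (out : List String) : Prop := out = line_to_list_py_alt line
instance (line : String) (out : List String) : Decidable (Spec_line_to_list_py line out) := by unfold Spec_line_to_list_py; infer_instance

-- ===== CLAIM (what is proved, stated in full; the proofs are below) =====
def Claim_equal_line_to_list_py : Prop := ∀ (line : String), Dom_line_to_list_py line → Spec_line_to_list_py line (line_to_list_py line)

-- ===== LEMMAS AND PROOFS =====
-- the two filters keep the same tokens: a string has nonzero length iff it is not ""
lemma pvFilter_eq (l : List String) :
    l.filter (fun x => PySem.Str.len x != 0) = l.filter (fun x => x != "") := by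
  apply List.filter_congr
  intro s _
  by_cases h : s = ""
  · subst h; rfl
  · have hl : s.length ≠ 0 := fun hn => h (String.length_eq_zero_iff.mp hn)
    have h1 : (s != "") = true := bne_iff_ne.mpr h
    have h2 : (PySem.Str.len s != 0) = true := by
      rw [PySem.Str.len_eq]; exact bne_iff_ne.mpr (by exact_mod_cast hl)
    rw [h1, h2]

-- A's branch cascade and B's merge loop agree on every token list
lemma pvBranches_eq_loop (df : List String) : pvBranchesA df = pvMergeLoop df := by
  match df with
  | [] => rw [pvMergeLoop]; rfl
  | [a] => rw [pvMergeLoop]; rfl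
  | [a, b] => rw [pvMergeLoop]; rfl
  | [a, b, c] => rw [pvMergeLoop]; rfl
  | [a, b, c, d] => rw [pvMergeLoop]; rfl
  | [a, b, c, d, e] =>
      simp [pvBranchesA, pvMergeLoop, pvMergeStep, PySem.List.pyGetD, PySem.List.pyGet?,
            PySem.List.pyIdx?, PySem.List.slice]
  | [a, b, c, d, e, f] =>
      simp [pvBranchesA, pvMergeLoop, pvMergeStep, PySem.List.pyGetD, PySem.List.pyGet?,
            PySem.List.pyIdx?, PySem.List.slice]
  | [a, b, c, d, e, f, g] =>
      simp [pvBranchesA, pvMergeLoop, pvMergeStep, PySem.List.pyGetD, PySem.List.pyGet?,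
            PySem.List.pyIdx?, PySem.List.slice]
  | [a, b, c, d, e, f, g, h] =>
      simp [pvBranchesA, pvMergeLoop, pvMergeStep, PySem.List.pyGetD, PySem.List.pyGet?,
            PySem.List.pyIdx?, PySem.List.slice]
  | a :: b :: c :: d :: e :: f :: g :: h :: i :: rest =>
      have hlen : (a :: b :: c :: d :: e :: f :: g :: h :: i :: rest).length = rest.length + 9 := by
        simp
      rw [pvMergeLoop]
      simp [pvBranchesA, hlen]

-- ===== VERDICT (by name: the statement is the Claim_ definition above) =====
theorem line_to_list_py_spec : Claim_equal_line_to_list_py := by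
  intro line _
  unfold Spec_line_to_list_py line_to_list_py line_to_list_py_alt
  rw [pvFilter_eq]
  exact pvBranches_eq_loop _
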